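-- pv_equiv track=rewrite | github.com/aymak91/HackerRankSolutions | 2022-11-21/item_buying.py | findMinimumPrice
-- ===== SOURCE A (Python) =====
-- from heapq import heapify, heappop, heappush
--
-- def findMinimumPrice(price, m):
--     price = [-x for x in price]
--     heapify(price)
--
--     for coop in range(m):
--         item = abs(heappop(price))
--         item //= 2
--         if item > 0:
--             heappush(price, -item)
--         if len(price) == 0:
--             break
--
--     return abs(sum(price))
-- ===== SOURCE B (Python) =====
-- # Precompute every halving reduction each price can ever yield, then take the
-- # m largest reductions globally instead of simulating the heap step by step.
-- from heapq import nlargest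
--
-- def findMinimumPrice(price, m):
--     reductions = []
--     for v in price:
--         while v > 0:
--             reductions.append(v - v // 2)
--             v //= 2
--     return sum(price) - sum(nlargest(m, reductions))
-- ===== Notes on version B (the rewrite author's own statement) =====
-- stated objective: simpler
-- what changed: Replaces the incremental pop-halve-push heap simulation by a precompute-then-select pass: flatten every price's whole chain of halving reductions into one list and subtract the m largest reductions from the total; Pre_ excludes the empty list with m>0 (A raises IndexError) and negative prices -- an accident of A's negate-and-abs heap encoding, prices are naturally nonnegative -- except in the no-op case m<=0 with nonnegative total, where the two agree.
-- outside the precondition, e.g. on findMinimumPrice([-4], 1): A returns 2, B returns -4; on findMinimumPrice([-4], 0): A returns 4, B returns -4; on findMinimumPrice([], 1): A raises IndexError, B returns 0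
import Mathlib
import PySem

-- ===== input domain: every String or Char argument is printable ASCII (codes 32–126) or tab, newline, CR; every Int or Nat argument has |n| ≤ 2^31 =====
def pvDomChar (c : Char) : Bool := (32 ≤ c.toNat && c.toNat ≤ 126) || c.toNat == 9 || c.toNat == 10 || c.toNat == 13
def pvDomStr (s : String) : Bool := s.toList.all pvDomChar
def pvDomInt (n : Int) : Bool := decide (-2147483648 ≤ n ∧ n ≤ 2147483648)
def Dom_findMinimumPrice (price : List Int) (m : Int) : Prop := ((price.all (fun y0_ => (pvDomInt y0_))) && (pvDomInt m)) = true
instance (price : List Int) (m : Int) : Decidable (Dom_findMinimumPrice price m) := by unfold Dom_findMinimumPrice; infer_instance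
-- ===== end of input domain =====

-- B replaces A's step-by-step heap simulation by a precompute-all-reductions-then-take-
-- the-m-largest pass; equivalence is about the return value only (A reads its freshly
-- built local heap list, no caller-visible mutation).

-- ===== PORT A =====
-- heapq is modeled by its multiset contract: heappop removes a minimal element
-- (PySem.List.min?, exact on the popped value), heappush adds one, heapify is the
-- identity on the multiset; only popped values and the final sum reach the result.
def aPop? (h : List Int) : Option (Int × List Int) :=
  match PySem.List.min? h (fun x => x) with
  | none => none
  | some e => some (e, h.erase e)

-- 'for coop in range(m):' with the two body ifs; fuel = number of remaining iterations
def aLoop : Nat → List Int → List Int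
  | 0, h => h
  | n+1, h =>
    match aPop? h with
    | none => h          -- Python raises IndexError here (heappop from []); excluded by Pre_
    | some (e, h1) =>
      let item := PySem.Int.floordiv |e| 2
      let h2 := if 0 < item then (-item) :: h1 else h1
      if h2.length = 0 then h2 else aLoop n h2

def findMinimumPrice (price : List Int) (m : Int) : Int :=
  |(aLoop m.toNat (price.map (fun x => -x))).sum|

-- ===== PORT B =====
-- the inner 'while v > 0: reductions.append(v - v // 2); v //= 2'
def bChain (v : Int) : List Int :=
  if h : 0 < v then (v - PySem.Int.floordiv v 2) :: bChain (PySem.Int.floordiv v 2) else []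
termination_by v.toNat
decreasing_by
  rw [PySem.Int.floordiv_eq_ediv_of_pos (by omega : (0:Int) < 2)]
  omega

-- 'nlargest(m, reductions)' = the first m of the descending sort (empty for m ≤ 0)
def findMinimumPrice_alt (price : List Int) (m : Int) : Int :=
  let reductions := price.foldl (fun acc v => acc ++ bChain v) []
  price.sum - ((PySem.List.sorted reductions (fun e => e) true).take m.toNat).sum

-- ===== PRECONDITION & SPEC =====
-- Pre_ excludes (a) the empty list with m > 0, on which A raises IndexError (heappop
-- from []), and (b) negative prices — A's value there is an accident of its
-- negate-the-list/abs-the-pop heap encoding, and prices are naturally nonnegative —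
-- except in the no-op case m ≤ 0 with a nonnegative total, where A's abs does nothing.
def Pre_findMinimumPrice (price : List Int) (m : Int) : Prop :=
  (price ≠ [] ∨ m ≤ 0) ∧ ((∀ x ∈ price, 0 ≤ x) ∨ (m ≤ 0 ∧ 0 ≤ price.sum))
instance (price : List Int) (m : Int) : Decidable (Pre_findMinimumPrice price m) := by
  unfold Pre_findMinimumPrice; infer_instance

def pvWitness_findMinimumPrice : List Int × Int := ([3, 0, 7], 5)

def Spec_findMinimumPrice (price : List Int) (m : Int) (out : Int) : Prop := out = findMinimumPrice_alt price m
instance (price : List Int) (m : Int) (out : Int) : Decidable (Spec_findMinimumPrice price m out) := by unfold Spec_findMinimumPrice; infer_instance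

-- ===== CLAIM (what is proved, stated in full; the proofs are below) =====
def Claim_equal_findMinimumPrice : Prop := ∀ (price : List Int) (m : Int), Dom_findMinimumPrice price m → Pre_findMinimumPrice price m → Spec_findMinimumPrice price m (findMinimumPrice price m)

-- ===== LEMMAS AND PROOFS =====

-- floor division by 2 is Lean's ediv
theorem fd2 (a : Int) : PySem.Int.floordiv a 2 = a / 2 :=
  PySem.Int.floordiv_eq_ediv_of_pos (by omega)

theorem bChain_nil {v : Int} (hv : v ≤ 0) : bChain v = [] := by
  rw [bChain]; simp [not_lt.mpr hv]

theorem bChain_cons {v : Int} (hv : 0 < v) : bChain v = (v - v / 2) :: bChain (v / 2) := by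
  rw [bChain]; simp [hv, fd2]

theorem bChain_le {v : Int} (hv : 0 < v) : ∀ e ∈ bChain v, e ≤ v - v / 2 := by
  rw [bChain_cons hv]
  intro e he
  rcases List.mem_cons.mp he with h | h
  · omega
  · by_cases h2 : 0 < v / 2
    · have := bChain_le h2 e h
      omega
    · rw [bChain_nil (by omega)] at h; cases h
termination_by v.toNat
decreasing_by omega

theorem halfgain_mono {y x : Int} (hy : 0 < y) (hxy : y ≤ x) : y - y / 2 ≤ x - x / 2 := by omega

theorem sortedD_eq {xs ys : List Int} (hp : ys.Perm xs) (hs : ys.Pairwise (fun a b => b ≤ a)) :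
    PySem.List.sorted xs (fun e => e) true = ys := by
  refine List.eq_of_perm_of_sorted (fun a b _ _ h1 h2 => le_antisymm h2 h1) ?_ hs
    (((PySem.List.sorted_perm xs (fun e => e) true).trans hp.symm))
  exact PySem.List.sorted_pairwise_rev xs (fun e => e)

theorem sortedD_congr {xs xs' : List Int} (h : xs.Perm xs') :
    PySem.List.sorted xs (fun e => e) true = PySem.List.sorted xs' (fun e => e) true :=
  sortedD_eq ((PySem.List.sorted_perm xs' (fun e => e) true).trans h.symm)
    (PySem.List.sorted_pairwise_rev xs' (fun e => e))

theorem sortedD_cons {xs t : List Int} {a : Int} (hp : xs.Perm (a :: t)) (hmax : ∀ y ∈ xs, y ≤ a) :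
    PySem.List.sorted xs (fun e => e) true = a :: PySem.List.sorted t (fun e => e) true := by
  refine sortedD_eq ?_ ?_
  · exact (List.Perm.cons a (PySem.List.sorted_perm t (fun e => e) true)).trans hp.symm
  · refine List.pairwise_cons.mpr ⟨?_, PySem.List.sorted_pairwise_rev t (fun e => e)⟩
    intro y hy
    exact hmax y (hp.mem_iff.mpr (List.mem_cons_of_mem a ((PySem.List.mem_sorted t (fun e => e) true y).mp hy)))

theorem events_le {l : List Int} {x : Int} (hx : 0 < x) (hnn : ∀ y ∈ l, 0 ≤ y)
    (hle : ∀ y ∈ l, y ≤ x) : ∀ e ∈ l.flatMap bChain, e ≤ x - x / 2 := by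
  intro e he
  rcases List.mem_flatMap.mp he with ⟨y, hy, hey⟩
  by_cases hpos : 0 < y
  · exact le_trans (bChain_le hpos e hey) (halfgain_mono hpos (hle y hy))
  · rw [bChain_nil (by have := hnn y hy; omega)] at hey; cases hey

-- B's value, written over the flattened reduction list
def fB (p : List Int) (n : Nat) : Int :=
  p.sum - ((PySem.List.sorted (p.flatMap bChain) (fun e => e) true).take n).sum

theorem fB_congr {p p' : List Int} (hp : p.Perm p') (n : Nat) : fB p n = fB p' n := by
  unfold fB
  rw [hp.sum_eq, sortedD_congr (hp.flatMap_right bChain)]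

theorem fB_nil (n : Nat) : fB [] n = 0 := by
  have h : PySem.List.sorted ([] : List Int) (fun e => e) true = [] :=
    sortedD_eq (List.Perm.refl _) List.Pairwise.nil
  simp [fB, h]

theorem fB_step (x : Int) (rest : List Int) (hx : 0 ≤ x) (hrest : ∀ y ∈ rest, 0 ≤ y)
    (hmax : ∀ y ∈ rest, y ≤ x) (n : Nat) :
    fB (x :: rest) (n + 1) = fB (if 0 < x / 2 then x / 2 :: rest else rest) n := by
  rcases lt_or_eq_of_le hx with hxpos | hx0
  · -- 0 < x : the globally largest reduction is x - x/2, the max's first halving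
    have hmaxT : ∀ e ∈ (x - x / 2) :: (bChain (x / 2) ++ rest.flatMap bChain), e ≤ x - x / 2 := by
      intro e he
      rcases List.mem_cons.mp he with rfl | he
      · exact le_refl _
      rcases List.mem_append.mp he with he | he
      · by_cases h2 : 0 < x / 2
        · exact le_trans (bChain_le h2 e he) (halfgain_mono h2 (by omega))
        · rw [bChain_nil (by omega)] at he; cases he
      · exact events_le hxpos hrest hmax e he
    have hsortL : PySem.List.sorted ((x :: rest).flatMap bChain) (fun e => e) true
        = (x - x / 2) :: PySem.List.sorted (bChain (x / 2) ++ rest.flatMap bChain) (fun e => e) true := by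
      rw [List.flatMap_cons, bChain_cons hxpos, List.cons_append]
      exact sortedD_cons (List.Perm.refl _) hmaxT
    by_cases hv : 0 < x / 2
    · rw [if_pos hv]
      unfold fB
      rw [hsortL, List.flatMap_cons, List.take_succ_cons, List.sum_cons, List.sum_cons,
        List.sum_cons]
      ring
    · rw [if_neg hv]
      have hv0 : x / 2 = 0 := by omega
      rw [hv0] at hsortL
      rw [bChain_nil (le_refl 0), List.nil_append] at hsortL
      unfold fB
      rw [hsortL, List.take_succ_cons, List.sum_cons, List.sum_cons]
      omega
  · -- x = 0 : all values are 0, no reductions exist at all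
    subst hx0
    have hall : ∀ y ∈ (0:Int) :: rest, y = 0 := by
      intro y hy
      rcases List.mem_cons.mp hy with rfl | hy
      · rfl
      · have := hrest y hy; have := hmax y hy; omega
    have hflat : ((0:Int) :: rest).flatMap bChain = [] := by
      apply List.flatMap_eq_nil_iff.mpr
      intro y hy
      rw [hall y hy]; exact bChain_nil (le_refl 0)
    have hflatR : rest.flatMap bChain = [] := by
      apply List.flatMap_eq_nil_iff.mpr
      intro y hy
      rw [hall y (List.mem_cons_of_mem _ hy)]; exact bChain_nil (le_refl 0)
    have hs : PySem.List.sorted ([] : List Int) (fun e => e) true = [] :=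
      sortedD_eq (List.Perm.refl _) List.Pairwise.nil
    rw [if_neg (by norm_num)]
    unfold fB
    rw [hflat, hflatR, hs]
    simp

theorem sum_nonpos_of_all (l : List Int) (h : ∀ y ∈ l, y ≤ 0) : l.sum ≤ 0 := by
  induction l with
  | nil => simp
  | cons a t ih =>
    have h1 := h a (by simp)
    have h2 := ih (fun y hy => h y (List.mem_cons_of_mem a hy))
    simp only [List.sum_cons]
    omega

theorem sum_map_neg (l : List Int) : (l.map (fun x => -x)).sum = -l.sum := by
  induction l with
  | nil => rfl
  | cons a t ih => simp [ih]; ring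

theorem aLoop_eq (n : Nat) : ∀ h : List Int, h ≠ [] → (∀ y ∈ h, y ≤ 0) →
    |(aLoop n h).sum| = fB (h.map (fun x => -x)) n := by
  induction n with
  | zero =>
    intro h hne hnp
    show |(aLoop 0 h).sum| = fB (h.map (fun x => -x)) 0
    have hs : h.sum ≤ 0 := sum_nonpos_of_all h hnp
    rw [aLoop]
    unfold fB
    simp [sum_map_neg, abs_of_nonpos hs]
  | succ n ih =>
    intro h hne hnp
    obtain ⟨e, he⟩ : ∃ e, PySem.List.min? h (fun x => x) = some e := by
      cases hm : PySem.List.min? h (fun x => x) with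
      | none => exact absurd ((PySem.List.min?_eq_none_iff h _).mp hm) hne
      | some e => exact ⟨e, rfl⟩
    have hemem : e ∈ h := PySem.List.min?_mem he
    have hmin : ∀ y ∈ h, e ≤ y := by simpa using PySem.List.min?_isMin he
    have he0 : e ≤ 0 := hnp e hemem
    have habs : |e| = -e := abs_of_nonpos he0
    have hitem : PySem.Int.floordiv |e| 2 = (-e) / 2 := by rw [fd2, habs]
    have hperm : (h.map (fun x => -x)).Perm ((-e) :: ((h.erase e).map (fun x => -x))) :=
      (List.perm_cons_erase hemem).map _
    have hrest0 : ∀ y ∈ (h.erase e).map (fun x => -x), 0 ≤ y := by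
      intro y hy
      rcases List.mem_map.mp hy with ⟨z, hz, rfl⟩
      have := hnp z (List.erase_subset hz); omega
    have hrestmax : ∀ y ∈ (h.erase e).map (fun x => -x), y ≤ -e := by
      intro y hy
      rcases List.mem_map.mp hy with ⟨z, hz, rfl⟩
      have := hmin z (List.erase_subset hz); omega
    have hRHS : fB (h.map (fun x => -x)) (n + 1)
        = fB ((if 0 < PySem.Int.floordiv |e| 2 then (-(PySem.Int.floordiv |e| 2)) :: h.erase e else h.erase e).map (fun x => -x)) n := by
      rw [fB_congr hperm]
      rw [fB_step (-e) ((h.erase e).map (fun x => -x)) (by omega) hrest0 hrestmax n]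
      congr 1
      rw [hitem]
      split <;> simp
    rw [hRHS, aLoop]
    simp only [aPop?, he]
    by_cases hlen : (if 0 < PySem.Int.floordiv |e| 2 then (-(PySem.Int.floordiv |e| 2)) :: h.erase e else h.erase e).length = 0
    · have hnil : (if 0 < PySem.Int.floordiv |e| 2 then (-(PySem.Int.floordiv |e| 2)) :: h.erase e else h.erase e) = [] :=
        List.length_eq_zero_iff.mp hlen
      rw [if_pos hlen, hnil, List.map_nil, fB_nil]
      simp
    · rw [if_neg hlen]
      refine ih _ (fun hc => hlen (by rw [hc]; rfl)) ?_
      intro y hy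
      have hgoal : y ∈ (-(PySem.Int.floordiv |e| 2)) :: h.erase e ∨ y ∈ h.erase e := by
        by_cases hc : 0 < PySem.Int.floordiv |e| 2
        · rw [if_pos hc] at hy; exact Or.inl hy
        · rw [if_neg hc] at hy; exact Or.inr hy
      have hitem0 : 0 ≤ PySem.Int.floordiv |e| 2 := by rw [hitem]; omega
      rcases hgoal with hy | hy
      · rcases List.mem_cons.mp hy with rfl | hy
        · omega
        · exact hnp y (List.erase_subset hy)
      · exact hnp y (List.erase_subset hy)

-- B's port unfolds to fB
theorem alt_eq_fB (price : List Int) (m : Int) :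
    findMinimumPrice_alt price m = fB price m.toNat := by
  unfold findMinimumPrice_alt fB
  rw [PySem.List.foldl_append_eq_flatMap]
  simp

theorem sum_nonneg_of_all (l : List Int) (h : ∀ y ∈ l, 0 ≤ y) : 0 ≤ l.sum := by
  induction l with
  | nil => simp
  | cons a t ih =>
    have h1 := h a (by simp)
    have h2 := ih (fun y hy => h y (List.mem_cons_of_mem a hy))
    simp only [List.sum_cons]
    omega

theorem fB_zero (p : List Int) : fB p 0 = p.sum := by
  simp [fB]

theorem alt_eq (price : List Int) (m : Int) (hpre : Pre_findMinimumPrice price m) :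
    findMinimumPrice price m = findMinimumPrice_alt price m := by
  obtain ⟨hor, hnn⟩ := hpre
  rw [alt_eq_fB]
  by_cases hm0 : m ≤ 0
  · have hm : m.toNat = 0 := by omega
    have hsum : 0 ≤ price.sum := by
      rcases hnn with h | h
      · exact sum_nonneg_of_all price h
      · exact h.2
    rw [hm, fB_zero]
    unfold findMinimumPrice
    rw [hm, aLoop, sum_map_neg, abs_neg, abs_of_nonneg hsum]
  · have hnn' : ∀ x ∈ price, 0 ≤ x := by
      rcases hnn with h | h
      · exact h
      · omega
    have hnil : price ≠ [] := by
      rcases hor with h | h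
      · exact h
      · omega
    clear hnn hor
    have hmapne : price.map (fun x => -x) ≠ [] := by simpa using hnil
    have hmapnp : ∀ y ∈ price.map (fun x => -x), y ≤ 0 := by
      intro y hy
      rcases List.mem_map.mp hy with ⟨z, hz, rfl⟩
      have := hnn' z hz; omega
    have := aLoop_eq m.toNat (price.map (fun x => -x)) hmapne hmapnp
    rw [List.map_map] at this
    simp only [Function.comp_def, neg_neg, List.map_id'] at this
    rw [findMinimumPrice, this]

-- ===== VERDICT (by name: the statement is the Claim_ definition above) =====
theorem findMinimumPrice_spec : Claim_equal_findMinimumPrice := by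
  intro price m _ hpre
  unfold Spec_findMinimumPrice
  exact alt_eq price m hpre
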